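-- pv_equiv track=rewrite | github.com/sweavo/code-advent-2019 | day04.py | has_double
-- ===== SOURCE A (Python) =====
-- def has_double( digits ):
--     """
--     >>> has_double( '11' )
--     True
--     >>> has_double( '112' )
--     True
--     >>> has_double( '211' )
--     True
--     >>> has_double( '121' )
--     False
--     >>> has_double( '111' )
--     False
--     >>> has_double( '11122111' )
--     True
--     """
--     val=digits[0]
--     runl=1
--     for i in range(1,len(digits)):
--         if digits[i] == val:
--             runl=runl+1
--         else:
--             if runl==2:
--                 return True
--             else:
--                 runl=1
--                 val=digits[i]
--     if runl==2:
--         return True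
--     else:
--         return False
-- ===== SOURCE B (Python) =====
-- def has_double(digits):
--     # Pad with None sentinels and slide a 4-wide window: a run of exactly two
--     # equal characters shows up as (a, b, c, d) with b == c, a != b, c != d.
--     padded = [None] + list(digits) + [None]
--     return any(b == c and a != b and c != d
--                for a, b, c, d in zip(padded, padded[1:], padded[2:], padded[3:]))
-- ===== Notes on version B (the rewrite author's own statement) =====
-- stated objective: alternative
-- what changed: Replaces A's stateful val/runl run-length accumulator with a stateless 4-wide sliding window over a None-padded sequence: a run of exactly two equal chars is spotted positionally as b==c, a!=b, c!=d.
-- crash fix: On the empty string A raises IndexError (digits[0]); B returns False. — e.g. on has_double(""): A raises IndexError, B returns false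
import Mathlib
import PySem

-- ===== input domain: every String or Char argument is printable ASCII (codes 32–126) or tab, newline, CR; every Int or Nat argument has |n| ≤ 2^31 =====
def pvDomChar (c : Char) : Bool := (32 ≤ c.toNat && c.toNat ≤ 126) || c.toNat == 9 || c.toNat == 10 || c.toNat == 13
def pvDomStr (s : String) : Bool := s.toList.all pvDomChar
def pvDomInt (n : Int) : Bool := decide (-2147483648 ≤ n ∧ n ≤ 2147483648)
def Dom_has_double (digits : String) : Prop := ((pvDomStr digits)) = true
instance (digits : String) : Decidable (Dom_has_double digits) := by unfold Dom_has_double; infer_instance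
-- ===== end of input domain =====

-- B replaces A's stateful val/runl run-length accumulator with a stateless 4-wide sliding
-- window over a None-padded character sequence (same cost; no speed claim).

-- ===== PORT A =====
-- A's for-loop with its mutable state variables val, runl and the early return
def hasDoubleLoopA : List Char → Char → Int → Bool
  | [], _, runl => runl == 2
  | c :: cs, val, runl =>
      if c == val then hasDoubleLoopA cs val (runl + 1)
      else if runl == 2 then true
      else hasDoubleLoopA cs c 1

def has_double (digits : String) : Bool :=
  match digits.toList with
  | [] => false            -- digits[0] raises IndexError here; excluded by Pre_has_double
  | v :: rest => hasDoubleLoopA rest v 1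

-- ===== PORT B =====
-- Source B's any(...) over zip(padded, padded[1:], padded[2:], padded[3:])
def win4any : List (Option Char) → Bool
  | a :: rest@(b :: c :: d :: _) => (b == c && a != b && c != d) || win4any rest
  | _ => false

-- Source B's padded = [None] + list(digits) + [None]
def has_double_alt (digits : String) : Bool :=
  win4any (none :: (digits.toList.map some ++ [none]))

-- ===== PRECONDITION & SPEC =====
-- Pre_ excludes only the empty string, on which A raises IndexError via digits[0].
def Pre_has_double (digits : String) : Prop := digits ≠ ""
instance (digits : String) : Decidable (Pre_has_double digits) := by unfold Pre_has_double; infer_instance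
def pvWitness_has_double : String := "112"

-- On the empty string A raises IndexError (digits[0]); B returns False (no 4-window exists).
def Raises_has_double (digits : String) : Prop := digits = ""
instance (digits : String) : Decidable (Raises_has_double digits) := by unfold Raises_has_double; infer_instance
def pvRaiseWitness_has_double : String := ""
def pvRaiseWitnessOut_has_double : Bool := false

def Spec_has_double (digits : String) (out : Bool) : Prop := out = has_double_alt digits
instance (digits : String) (out : Bool) : Decidable (Spec_has_double digits out) := by unfold Spec_has_double; infer_instance

-- ===== CLAIM (what is proved, stated in full; the proofs are below) =====
def Claim_equal_has_double : Prop := ∀ (digits : String), Dom_has_double digits → Pre_has_double digits → Spec_has_double digits (has_double digits)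
def Claim_raises_has_double : Prop := (∀ (digits : String), Dom_has_double digits → Raises_has_double digits → ¬ Pre_has_double digits) ∧ (Dom_has_double (pvRaiseWitness_has_double) ∧ Raises_has_double (pvRaiseWitness_has_double) ∧ has_double_alt (pvRaiseWitness_has_double) = pvRaiseWitnessOut_has_double)

-- ===== LEMMAS AND PROOFS =====

theorem win4any_cons4 (a b c d : Option Char) (rest : List (Option Char)) :
    win4any (a :: b :: c :: d :: rest)
      = ((b == c && a != b && c != d) || win4any (b :: c :: d :: rest)) := by
  simp [win4any]

-- every window inside a trailing run of v's followed only by the terminal None fails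
theorem win4any_run_self (v : Char) :
    ∀ (k : Nat), win4any (some v :: (List.replicate k (some v) ++ [none])) = false := by
  intro k
  induction k with
  | zero => simp [win4any]
  | succ n ih =>
    match n, ih with
    | 0, _ => simp [win4any, List.replicate]
    | 1, _ => simp [win4any, List.replicate]
    | Nat.succ (Nat.succ p), ih =>
        rw [show List.replicate (p+3) (some v) = some v :: some v :: some v :: List.replicate p (some v) from rfl]
        rw [show List.replicate (p+2) (some v) = some v :: some v :: List.replicate p (some v) from rfl] at ih
        simp only [List.cons_append] at ih ⊢
        rw [win4any_cons4, ih]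
        simp

-- a trailing run of length ≥ 3 yields no true window, whatever precedes it
theorem win4any_run_self' (v : Char) (prev : Option Char) :
    ∀ (m : Nat), win4any (prev :: (List.replicate (m + 3) (some v) ++ [none])) = false := by
  intro m
  rw [show List.replicate (m+3) (some v) = some v :: some v :: some v :: List.replicate m (some v) from rfl]
  have h := win4any_run_self v (m+2)
  rw [show List.replicate (m+2) (some v) = some v :: some v :: List.replicate m (some v) from rfl] at h
  simp only [List.cons_append] at h ⊢
  rw [win4any_cons4, h]
  simp

-- crossing a run's right boundary into c ≠ v, the only possibly-true window among the
-- run's windows is the one witnessing a run of exactly two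
theorem win4any_run (v c : Char) (T : List (Option Char)) (hcv : c ≠ v) :
    ∀ (runl : Nat), 1 ≤ runl → ∀ (prev : Option Char),
      win4any (prev :: (List.replicate runl (some v) ++ some c :: T))
        = ((decide (runl = 2) && decide (prev ≠ some v)) || win4any (some v :: some c :: T)) := by
  intro runl
  induction runl with
  | zero => omega
  | succ n ih =>
    intro _ prev
    match n, ih with
    | 0, _ =>
        cases T with
        | nil => simp [win4any, List.replicate]
        | cons d T' => simp [win4any_cons4, List.replicate, Ne.symm hcv]
    | 1, _ =>
        cases T with
        | nil =>
            by_cases hp : prev = some v <;>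
              simp [win4any, List.replicate, Ne.symm hcv, hp]
        | cons d T' =>
            by_cases hp : prev = some v <;>
              simp [win4any_cons4, List.replicate, Ne.symm hcv, hp]
    | Nat.succ (Nat.succ m), ih =>
        have h := ih (by omega) (some v)
        rw [show List.replicate (m+2) (some v) = some v :: some v :: List.replicate m (some v) from rfl] at h
        rw [show List.replicate (m+3) (some v) = some v :: some v :: some v :: List.replicate m (some v) from rfl]
        simp only [List.cons_append] at h ⊢
        rw [win4any_cons4, h]
        simp

-- main invariant: A's loop state (cs, val, runl) matches the window list
-- prev :: runl copies of val ++ rest of the string ++ [None], with prev ≠ some val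
theorem loopA_eq_win4any :
    ∀ (cs : List Char) (val : Char) (runl : Nat), 1 ≤ runl →
      ∀ (prev : Option Char), prev ≠ some val →
        hasDoubleLoopA cs val (runl : Int)
          = win4any (prev :: (List.replicate runl (some val) ++ cs.map some ++ [none])) := by
  intro cs
  induction cs with
  | nil =>
      intro val runl h1 prev hprev
      match runl, h1 with
      | 1, _ => simp [hasDoubleLoopA, win4any, List.replicate]
      | 2, _ => simp [hasDoubleLoopA, win4any, List.replicate, hprev]
      | Nat.succ (Nat.succ (Nat.succ m)), _ =>
          have h := win4any_run_self' val prev m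
          simp only [List.map_nil, List.append_nil] at h ⊢
          rw [h]
          simp [hasDoubleLoopA]
          omega
  | cons c cs' ih =>
      intro val runl h1 prev hprev
      by_cases hc : c = val
      · subst hc
        have hrep : List.replicate runl (some c) ++ (c :: cs').map some ++ [none]
            = List.replicate (runl + 1) (some c) ++ cs'.map some ++ [none] := by
          rw [List.replicate_succ']
          simp [List.append_assoc]
        rw [show hasDoubleLoopA (c :: cs') c (runl : Int)
              = hasDoubleLoopA cs' c ((runl : Int) + 1) by simp [hasDoubleLoopA]]
        rw [show ((runl : Int) + 1) = ((runl + 1 : Nat) : Int) by push_cast; ring]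
        rw [ih c (runl + 1) (by omega) prev hprev]
        rw [hrep]
      · have hstep : hasDoubleLoopA (c :: cs') val (runl : Int)
            = if (runl : Int) = 2 then true else hasDoubleLoopA cs' c 1 := by
          simp [hasDoubleLoopA, hc]
        have hrun := win4any_run val c (cs'.map some ++ [none]) hc runl h1 prev
        have htail := ih c 1 (by omega) (some val) (by simp [Ne.symm hc])
        simp only [List.map_cons, List.append_assoc, List.cons_append, List.replicate,
          List.nil_append, Nat.cast_one] at hrun htail ⊢
        rw [hstep, hrun, ← htail]
        by_cases h2 : runl = 2
        · simp [h2, hprev]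
        · have h2' : ¬ ((runl : Int) = 2) := by omega
          simp [h2, h2']

-- ===== VERDICT (by name: the statement is the Claim_ definition above) =====
theorem has_double_spec : Claim_equal_has_double := by
  intro digits _ hpre
  unfold Spec_has_double has_double has_double_alt
  cases h : digits.toList with
  | nil =>
      exact absurd (by simpa using congrArg String.ofList h) hpre
  | cons v rest =>
      show hasDoubleLoopA rest v 1 = win4any (none :: ((v :: rest).map some ++ [none]))
      have hmain := loopA_eq_win4any rest v 1 (le_refl 1) none (by simp)
      simpa [List.replicate] using hmain

theorem has_double_raises : Claim_raises_has_double := by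
  unfold Claim_raises_has_double
  refine ⟨fun digits _ hr hp => hp hr, by decide, rfl, ?_⟩
  simp [has_double_alt, pvRaiseWitness_has_double, pvRaiseWitnessOut_has_double, win4any]

-- self-check: B's value at the raise witness, extracted from the raises claim
theorem pvRaiseWitness_has_double_ok : has_double_alt "" = false := has_double_raises.2.2.2
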